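-- pv_equiv track=rewrite | github.com/luciancah/TIL | PS/leetcode/2485-find-the-pivot-integer/2485-find-the-pivot-integer.py | pivotInteger
-- ===== SOURCE A (Python) =====
-- def pivotInteger(n: int) -> int:
--     ans = -1
--     leftSum = 0
--     rightSum = 0
--     nums = [i for i in range(n)]
--     allSum = 0
--
--     for i in range(1, n + 1):
--         allSum += i
--
--     for i in range(1, n + 1):
--         leftSum += i
--         rightSum = allSum - leftSum
--         if leftSum - i == rightSum:
--             ans = i
--     return ans
-- ===== SOURCE B (Python) =====
-- def pivotInteger(n: int) -> int:
--     # Binary search for the pivot: x is the pivot iff x*x == n*(n+1)//2.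
--     if n < 1:
--         return -1
--     total = n * (n + 1) // 2
--     lo, hi = 1, n
--     while lo < hi:
--         mid = (lo + hi) // 2
--         if mid * mid < total:
--             lo = mid + 1
--         else:
--             hi = mid
--     return lo if lo * lo == total else -1
-- ===== Notes on version B (the rewrite author's own statement) =====
-- stated objective: faster
-- what changed: Replaces the two linear accumulation loops by the closed-form triangular sum and a binary search for the unique x with x*x == n*(n+1)//2.
import Mathlib
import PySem

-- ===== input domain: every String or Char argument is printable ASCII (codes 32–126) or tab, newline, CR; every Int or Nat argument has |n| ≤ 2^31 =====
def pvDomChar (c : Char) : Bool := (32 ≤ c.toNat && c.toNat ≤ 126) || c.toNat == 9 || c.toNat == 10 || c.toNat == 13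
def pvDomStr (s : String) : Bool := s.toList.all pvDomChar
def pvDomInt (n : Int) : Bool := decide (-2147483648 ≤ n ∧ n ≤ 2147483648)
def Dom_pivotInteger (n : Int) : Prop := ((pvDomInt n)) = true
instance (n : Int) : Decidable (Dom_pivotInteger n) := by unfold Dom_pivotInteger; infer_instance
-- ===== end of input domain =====

-- B replaces A's two linear loops by the closed-form triangular sum and a binary
-- search for the unique x with x*x = n*(n+1)//2 (objective: faster).

-- ===== PORT A =====
def pivotInteger (n : Int) : Int :=
  let ans : Int := -1
  let leftSum : Int := 0
  let rightSum : Int := 0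
  let _nums := PySem.List.pyRange 0 n 1
  let allSum : Int := (PySem.List.pyRange 1 (n + 1) 1).foldl (fun s i => s + i) 0
  let st := (PySem.List.pyRange 1 (n + 1) 1).foldl
    (fun (st : Int × Int × Int) i =>
      let leftSum := st.2.1 + i
      let rightSum := allSum - leftSum
      let ans := if leftSum - i = rightSum then i else st.1
      (ans, leftSum, rightSum))
    (ans, leftSum, rightSum)
  st.1

-- ===== PORT B =====
-- the while-loop of Source B, state (lo, hi); terminates since hi - lo shrinks
def pivotSearch (total lo hi : Int) : Int :=
  if _h : lo < hi then
    let mid := PySem.Int.floordiv (lo + hi) 2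
    if mid * mid < total then pivotSearch total (mid + 1) hi
    else pivotSearch total lo mid
  else lo
termination_by (hi - lo).toNat
decreasing_by
  · have h1 : lo ≤ PySem.Int.floordiv (lo + hi) 2 :=
      (PySem.Int.floordiv_two_mid_bounds (le_of_lt _h)).1
    omega
  · have h2 : PySem.Int.floordiv (lo + hi) 2 < hi := by
      rw [PySem.Int.floordiv_lt_iff_lt_mul (by omega : (0:Int) < 2)]
      omega
    omega

def pivotInteger_alt (n : Int) : Int :=
  if n < 1 then -1
  else
    let total := PySem.Int.floordiv (n * (n + 1)) 2
    let lo := pivotSearch total 1 n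
    if lo * lo = total then lo else -1

-- ===== PRECONDITION & SPEC =====
def Spec_pivotInteger (n : Int) (out : Int) : Prop := out = pivotInteger_alt n
instance (n : Int) (out : Int) : Decidable (Spec_pivotInteger n out) := by unfold Spec_pivotInteger; infer_instance

-- ===== CLAIM (what is proved, stated in full; the proofs are below) =====
def Claim_equal_pivotInteger : Prop := ∀ (n : Int), Dom_pivotInteger n → Spec_pivotInteger n (pivotInteger n)

-- ===== LEMMAS AND PROOFS =====

-- A's first loop computes the triangular number: 2 * Σ_{i=1..k} i = k*(k+1) for k ≥ 0
theorem sumLoop_eq (k : Int) (hk : 0 ≤ k) :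
    2 * (PySem.List.pyRange 1 (k + 1) 1).foldl (fun s i => s + i) 0 = k * (k + 1) := by
  induction k, hk using Int.le_induction with
  | base =>
    rw [PySem.List.pyRange_one_eq_nil (by omega : (0:Int) + 1 ≤ 1)]
    rfl
  | succ m hm ih =>
    rw [PySem.List.pyRange_one_succ_right (by omega : (1:Int) ≤ m + 1), List.foldl_append]
    simp only [List.foldl]
    ring_nf
    ring_nf at ih
    omega

-- characterisation of A's second loop
theorem mainLoop_inv (allSum : Int) (k : Int) (hk : 0 ≤ k) :
    ∃ L a R, (PySem.List.pyRange 1 (k + 1) 1).foldl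
      (fun (st : Int × Int × Int) i =>
        let leftSum := st.2.1 + i
        let rightSum := allSum - leftSum
        let ans := if leftSum - i = rightSum then i else st.1
        (ans, leftSum, rightSum))
      (-1, 0, 0) = (a, L, R) ∧ 2 * L = k * (k + 1) ∧
      ((a = -1 ∧ ∀ i, 1 ≤ i → i ≤ k → i * i ≠ allSum) ∨
       (1 ≤ a ∧ a ≤ k ∧ a * a = allSum)) := by
  induction k, hk using Int.le_induction with
  | base =>
    refine ⟨0, -1, 0, ?_, by ring, Or.inl ⟨rfl, fun i h1 h2 => by omega⟩⟩
    rw [PySem.List.pyRange_one_eq_nil (by omega : (0:Int) + 1 ≤ 1)]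
    rfl
  | succ m hm ih =>
    obtain ⟨L, a, R, hfold, hL, hcase⟩ := ih
    rw [PySem.List.pyRange_one_succ_right (by omega : (1:Int) ≤ m + 1), List.foldl_append,
      hfold]
    simp only [List.foldl]
    by_cases hc : L + (m + 1) - (m + 1) = allSum - (L + (m + 1))
    · exact ⟨L + (m + 1), m + 1, allSum - (L + (m + 1)), by simp only [if_pos hc],
        by ring_nf; ring_nf at hL; omega, Or.inr ⟨by omega, le_refl _, by nlinarith⟩⟩
    · refine ⟨L + (m + 1), a, allSum - (L + (m + 1)), by simp only [if_neg hc], 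
        by ring_nf; ring_nf at hL; omega, ?_⟩
      rcases hcase with ⟨ha, hno⟩ | ⟨h1, h2, h3⟩
      · refine Or.inl ⟨ha, fun i hi1 hi2 => ?_⟩
        rcases lt_or_eq_of_le hi2 with hlt | heq
        · exact hno i hi1 (by omega)
        · subst heq; intro habs; apply hc; nlinarith
      · exact Or.inr ⟨h1, by omega, h3⟩

-- binary-search invariant for B's loop (induction on a bound for hi - lo)
theorem pivotSearch_spec_aux (total : Int) (d : Nat) :
    ∀ (lo hi : Int), (hi - lo).toNat ≤ d → 0 ≤ lo → lo ≤ hi →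
    lo ≤ pivotSearch total lo hi ∧ pivotSearch total lo hi ≤ hi ∧
    (total ≤ hi * hi → total ≤ pivotSearch total lo hi * pivotSearch total lo hi) ∧
    (∀ x, lo ≤ x → x < pivotSearch total lo hi → x * x < total) := by
  induction d with
  | zero =>
    intro lo hi hd hlo h
    have heq : lo = hi := by omega
    rw [pivotSearch, dif_neg (by omega : ¬ lo < hi)]
    subst heq
    exact ⟨le_refl _, le_refl _, fun ht => ht, fun x h1 h2 => by omega⟩
  | succ d ih =>
    intro lo hi hd hlo h
    rw [pivotSearch]
    by_cases hlt : lo < hi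
    · rw [dif_pos hlt]
      have hb := PySem.Int.floordiv_two_mid_bounds (le_of_lt hlt)
      have hmid2 : PySem.Int.floordiv (lo + hi) 2 < hi := by
        rw [PySem.Int.floordiv_lt_iff_lt_mul (by omega : (0:Int) < 2)]; omega
      simp only []
      split_ifs with hc
      · obtain ⟨i1, i2, i3, i4⟩ := ih (PySem.Int.floordiv (lo + hi) 2 + 1) hi (by omega) (by omega) (by omega)
        refine ⟨by omega, i2, i3, fun x hx1 hx2 => ?_⟩
        by_cases hge : PySem.Int.floordiv (lo + hi) 2 + 1 ≤ x
        · exact i4 x hge hx2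
        · have hx : x ≤ PySem.Int.floordiv (lo + hi) 2 := by omega
          nlinarith [hb.1, hlo]
      · obtain ⟨i1, i2, i3, i4⟩ := ih lo (PySem.Int.floordiv (lo + hi) 2) (by omega) hlo hb.1
        exact ⟨i1, by omega, fun _ => i3 (by omega), i4⟩
    · rw [dif_neg hlt]
      have heq : lo = hi := by omega
      subst heq
      exact ⟨le_refl _, le_refl _, fun ht => ht, fun x h1 h2 => by omega⟩

theorem pivotSearch_spec (total lo hi : Int) (hlo : 0 ≤ lo) (h : lo ≤ hi) :
    lo ≤ pivotSearch total lo hi ∧ pivotSearch total lo hi ≤ hi ∧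
    (total ≤ hi * hi → total ≤ pivotSearch total lo hi * pivotSearch total lo hi) ∧
    (∀ x, lo ≤ x → x < pivotSearch total lo hi → x * x < total) :=
  pivotSearch_spec_aux total (hi - lo).toNat lo hi (le_refl _) hlo h

-- ===== VERDICT (by name: the statement is the Claim_ definition above) =====
theorem pivotInteger_spec : Claim_equal_pivotInteger := by
  intro n _hdom
  show pivotInteger n = pivotInteger_alt n
  simp only [pivotInteger, pivotInteger_alt]
  by_cases hn : n < 1
  · rw [if_pos hn, PySem.List.pyRange_one_eq_nil (by omega : n + 1 ≤ 1)]
    rfl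
  · rw [if_neg hn]
    have hn1 : (1:Int) ≤ n := by omega
    have hsum := sumLoop_eq n (by omega)
    set S := (PySem.List.pyRange 1 (n + 1) 1).foldl (fun s i => s + i) 0 with hS
    have htot : PySem.Int.floordiv (n * (n + 1)) 2 = S := by
      rw [PySem.Int.floordiv_eq_iff_of_pos (by omega : (0:Int) < 2)]
      exact ⟨by linarith, by linarith⟩
    rw [htot]
    obtain ⟨L, a, R, hfold, hL, hcase⟩ := mainLoop_inv S n (by omega)
    rw [hfold]
    obtain ⟨r1, r2, r3, r4⟩ := pivotSearch_spec S 1 n (by omega) hn1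
    have htn : S ≤ n * n := by nlinarith
    have hr3 := r3 htn
    rcases hcase with ⟨ha, hno⟩ | ⟨h1, h2, h3⟩
    · rw [if_neg (hno _ r1 r2)]
      exact ha
    · have hres : pivotSearch S 1 n = a := by
        by_contra hne
        rcases lt_or_gt_of_ne hne with hlt | hgt
        · nlinarith [r1]
        · exact absurd h3 (ne_of_lt (r4 a h1 hgt))
      rw [hres, if_pos h3]
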